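-- pv_equiv track=rewrite | github.com/nymoral/euler | p26.py | longest_d
-- ===== SOURCE A (Python) =====
-- max_s = 100
--
-- def rep_len(n):
--     # http://mathworld.wolfram.com/DecimalExpansion.html
--     for s in range(max_s):
--         for t in range(1, n):
--             if 10**s == (10**(s+t)) % n:
--                 return t
--     return -1
--
-- def longest_d(limit):
--     m = 1
--     d = -1
--     for n in range(2, limit):
--         # In base-10 it's factors 2 and 5 will not produce recurring cycles. 3 won't produce anything of significant lenth.
--         # Calculation is crazy slow without this.
--         if n % 2 != 0 and n % 3 != 0 and n % 5 != 0:
--             r = rep_len(n)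
--             if r > m:
--                 m = r
--                 d = n
--     return d
-- ===== SOURCE B (Python) =====
-- def longest_d(limit):
--     m = 1
--     d = -1
--     for n in range(2, limit):
--         if n % 2 != 0 and n % 3 != 0 and n % 5 != 0:
--             # multiplicative order of 10 mod n = repetend length of 1/n,
--             # found by iterating the running remainder (no bigint powers).
--             r = 1
--             t = -1
--             for k in range(1, n):
--                 r = r * 10 % n
--                 if r == 1:
--                     t = k
--                     break
--             if t > m:
--                 m = t
--                 d = n
--     return d
-- ===== Notes on version B (the rewrite author's own statement) =====
-- stated objective: faster
-- what changed: Replaces the nested search that compares unreduced bigint powers of ten by a single modular loop that multiplies a running remainder by ten mod n and returns the first exponent where the remainder becomes unity (the multiplicative order of ten mod n = repetend length).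
import Mathlib
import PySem

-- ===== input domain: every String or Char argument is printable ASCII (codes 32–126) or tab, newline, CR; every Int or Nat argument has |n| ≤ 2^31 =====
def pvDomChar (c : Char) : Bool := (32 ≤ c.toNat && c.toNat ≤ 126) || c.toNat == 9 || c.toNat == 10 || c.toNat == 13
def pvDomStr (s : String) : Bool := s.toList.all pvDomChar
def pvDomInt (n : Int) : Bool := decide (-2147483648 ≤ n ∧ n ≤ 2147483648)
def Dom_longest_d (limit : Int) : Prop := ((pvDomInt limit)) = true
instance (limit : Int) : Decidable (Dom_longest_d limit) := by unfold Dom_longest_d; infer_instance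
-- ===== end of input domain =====

-- B replaces A's nested bigint-power search for the repetend length by a single
-- modular loop on the running remainder (the multiplicative order of ten mod n): faster.

-- ===== PORT A =====
-- inner 'for t in range(1, n)' of rep_len; exponents s, t are always ≥ 0 here
-- (they come from range(0,100) / range(1,n)), so 10**s is exactly 10^s.toNat.
def repLenInner (n s : Int) (ts : List Int) : Option Int :=
  match ts with
  | [] => none
  | t :: rest =>
      if (10:Int) ^ s.toNat = PySem.Int.mod ((10:Int) ^ (s + t).toNat) n then some t
      else repLenInner n s rest

-- outer 'for s in range(max_s)' of rep_len
def repLenOuter (n : Int) (ss : List Int) : Int :=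
  match ss with
  | [] => -1
  | s :: rest =>
      match repLenInner n s (PySem.List.pyRange 1 n 1) with
      | some t => t
      | none => repLenOuter n rest

def rep_len (n : Int) : Int := repLenOuter n (PySem.List.pyRange 0 100 1)

def longest_d (limit : Int) : Int :=
  ((PySem.List.pyRange 2 limit 1).foldl (fun md n =>
    if PySem.Int.mod n 2 ≠ 0 ∧ PySem.Int.mod n 3 ≠ 0 ∧ PySem.Int.mod n 5 ≠ 0 then
      let r := rep_len n
      if r > md.1 then (r, n) else md
    else md) ((1:Int), (-1:Int))).2

-- ===== PORT B =====
-- B's inner loop: multiply the running remainder by ten mod n, return the first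
-- exponent where it becomes unity; the no-break fallback value otherwise
def orderLoop (n r : Int) (ks : List Int) : Int :=
  match ks with
  | [] => -1
  | k :: rest =>
      let r' := PySem.Int.mod (r * 10) n
      if r' = 1 then k else orderLoop n r' rest

def longest_d_alt (limit : Int) : Int :=
  ((PySem.List.pyRange 2 limit 1).foldl (fun md n =>
    if PySem.Int.mod n 2 ≠ 0 ∧ PySem.Int.mod n 3 ≠ 0 ∧ PySem.Int.mod n 5 ≠ 0 then
      let t := orderLoop n 1 (PySem.List.pyRange 1 n 1)
      if t > md.1 then (t, n) else md
    else md) ((1:Int), (-1:Int))).2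

-- ===== PRECONDITION & SPEC =====
def Spec_longest_d (limit : Int) (out : Int) : Prop := out = longest_d_alt limit
instance (limit : Int) (out : Int) : Decidable (Spec_longest_d limit out) := by unfold Spec_longest_d; infer_instance

-- ===== CLAIM (what is proved, stated in full; the proofs are below) =====
def Claim_equal_longest_d : Prop := ∀ (limit : Int), Dom_longest_d limit → Spec_longest_d limit (longest_d limit)

-- ===== LEMMAS AND PROOFS =====

-- coprimality of n with 10 from n % 2 ≠ 0 and n % 5 ≠ 0
theorem gcd_prime_eq_one (n p : Int) (hp : Nat.Prime p.natAbs) (h : ¬ p ∣ n) : Int.gcd n p = 1 := by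
  have h' : ¬ p.natAbs ∣ n.natAbs := by
    intro hd
    exact h ((Int.natAbs_dvd_natAbs).mp hd)
  exact Nat.coprime_comm.mp ((Nat.Prime.coprime_iff_not_dvd hp).mpr h')

theorem coprime_ten (n : Int) (h2 : ¬ (2:Int) ∣ n) (h5 : ¬ (5:Int) ∣ n) : IsCoprime n 10 := by
  have c2 : IsCoprime n 2 := Int.isCoprime_iff_gcd_eq_one.mpr (gcd_prime_eq_one n 2 (by norm_num) h2)
  have c5 : IsCoprime n 5 := Int.isCoprime_iff_gcd_eq_one.mpr (gcd_prime_eq_one n 5 (by norm_num) h5)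
  have : IsCoprime n (2 * 5) := IsCoprime.mul_right c2 c5
  norm_num at this
  exact this

-- if A's inner condition fires, then 10^t ≡ 1 (mod n)
theorem hit_gives_order (n s t : Int) (hn : 2 ≤ n) (hs : 0 ≤ s) (ht : 0 ≤ t)
    (hcop : IsCoprime n 10)
    (h : (10:Int) ^ s.toNat = PySem.Int.mod ((10:Int) ^ (s + t).toNat) n) :
    (10:Int) ^ t.toNat % n = 1 := by
  rw [PySem.Int.mod_eq_emod_of_pos (by omega)] at h
  have hst : (s + t).toNat = s.toNat + t.toNat := by omega
  have hsmall : (10:Int) ^ s.toNat < n := by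
    have := Int.emod_lt_of_pos ((10:Int) ^ (s + t).toNat) (b := n) (by omega)
    omega
  have hmods : (10:Int) ^ s.toNat % n = (10:Int) ^ s.toNat :=
    Int.emod_eq_of_lt (by positivity) hsmall
  have heq : (10:Int) ^ (s + t).toNat % n = (10:Int) ^ s.toNat % n := by rw [hmods, ← h]
  have hdvd : n ∣ (10:Int) ^ (s + t).toNat - (10:Int) ^ s.toNat := by
    have := Int.emod_eq_emod_iff_emod_sub_eq_zero.mp heq
    exact Int.dvd_of_emod_eq_zero this
  have hfac : (10:Int) ^ (s + t).toNat - (10:Int) ^ s.toNat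
      = ((10:Int) ^ t.toNat - 1) * (10:Int) ^ s.toNat := by
    rw [hst, pow_add]; ring
  rw [hfac] at hdvd
  have hdvd1 : n ∣ (10:Int) ^ t.toNat - 1 :=
    (IsCoprime.pow_right (n := s.toNat) hcop).dvd_of_dvd_mul_right hdvd
  have : (10:Int) ^ t.toNat % n = 1 % n :=
    Int.emod_eq_emod_iff_emod_sub_eq_zero.mpr (Int.emod_eq_zero_of_dvd hdvd1)
  rw [this, Int.emod_eq_of_lt (by norm_num) (by omega)]

-- B's loop agrees with A's inner loop at s = 0, given the remainder invariant
theorem inner_agree (n : Int) (hn : 2 ≤ n) :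
    ∀ (a : Int), 1 ≤ a →
    orderLoop n ((10:Int) ^ (a - 1).toNat % n) (PySem.List.pyRange a n 1) =
      (match repLenInner n 0 (PySem.List.pyRange a n 1) with
        | some t => t
        | none => (-1 : Int)) := by
  intro a ha
  by_cases hab : a < n
  · rw [PySem.List.pyRange_one_cons hab]
    have hpow : PySem.Int.mod ((10:Int) ^ (a - 1).toNat % n * 10) n = (10:Int) ^ a.toNat % n := by
      rw [PySem.Int.mod_eq_emod_of_pos (by omega)]
      have h1 : (10:Int) ^ (a - 1).toNat % n * 10 % n = (10:Int) ^ (a - 1).toNat * 10 % n := by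
        conv_lhs => rw [Int.mul_emod]
        conv_rhs => rw [Int.mul_emod]
        rw [Int.emod_emod_of_dvd _ (dvd_refl n)]
      have h2 : (10:Int) ^ (a - 1).toNat * 10 = (10:Int) ^ a.toNat := by
        have : a.toNat = (a - 1).toNat + 1 := by omega
        rw [this, pow_succ]
      rw [h1, h2]
    have hcondA : ((10:Int) ^ (0:Int).toNat = PySem.Int.mod ((10:Int) ^ ((0:Int) + a).toNat) n)
        ↔ ((10:Int) ^ a.toNat % n = 1) := by
      simp only [Int.toNat_zero, pow_zero, zero_add, PySem.Int.mod_eq_emod_of_pos (show (0:Int) < n by omega)]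
      constructor <;> intro h <;> omega
    unfold orderLoop repLenInner
    simp only [hpow]
    by_cases hc : (10:Int) ^ a.toNat % n = 1
    · rw [if_pos hc, if_pos (hcondA.mpr hc)]
    · rw [if_neg hc, if_neg (fun h => hc (hcondA.mp h))]
      have := inner_agree n hn (a + 1) (by omega)
      simpa using this
  · rw [PySem.List.pyRange_one_eq_nil (by omega)]
    rfl
termination_by a => (n - a).toNat
decreasing_by omega

-- characterisation of 'repLenInner = none'
theorem repLenInner_none_iff (n s : Int) (ts : List Int) :
    repLenInner n s ts = none ↔
      ∀ t ∈ ts, ¬ ((10:Int) ^ s.toNat = PySem.Int.mod ((10:Int) ^ (s + t).toNat) n) := by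
  induction ts with
  | nil => simp [repLenInner]
  | cons t rest ih =>
      unfold repLenInner
      by_cases h : (10:Int) ^ s.toNat = PySem.Int.mod ((10:Int) ^ (s + t).toNat) n
      · simp [h]
      · simp [h, ih]

-- when no order exists in [1, n), every pass of A's outer loop fails
theorem outer_all_none (n : Int) (hn : 2 ≤ n) (hcop : IsCoprime n 10)
    (H : ∀ t, 1 ≤ t → t < n → (10:Int) ^ t.toNat % n ≠ 1) :
    ∀ (ss : List Int), (∀ s ∈ ss, 0 ≤ s) → repLenOuter n ss = -1 := by
  intro ss
  induction ss with
  | nil => intro _; rfl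
  | cons s rest ih =>
      intro hss
      have hnone : repLenInner n s (PySem.List.pyRange 1 n 1) = none := by
        rw [repLenInner_none_iff]
        intro t htmem hcond
        rw [PySem.List.mem_pyRange_one] at htmem
        exact H t htmem.1 htmem.2
          (hit_gives_order n s t hn (hss s (by simp)) (by omega) hcop hcond)
      unfold repLenOuter
      rw [hnone]
      exact ih (fun x hx => hss x (by simp [hx]))

-- the heart: A's rep_len equals B's order loop, for any filtered candidate n
theorem rep_len_eq_order (n : Int) (hn : 2 ≤ n)
    (h2 : PySem.Int.mod n 2 ≠ 0) (h5 : PySem.Int.mod n 5 ≠ 0) :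
    rep_len n = orderLoop n 1 (PySem.List.pyRange 1 n 1) := by
  have hcop : IsCoprime n 10 :=
    coprime_ten n (fun h => h2 ((PySem.Int.mod_eq_zero_iff_dvd n 2).mpr h))
      (fun h => h5 ((PySem.Int.mod_eq_zero_iff_dvd n 5).mpr h))
  have hinit : (10:Int) ^ ((1:Int) - 1).toNat % n = 1 := by
    norm_num
    exact Int.emod_eq_of_lt (by norm_num) (by omega)
  have hmain := inner_agree n hn 1 (by norm_num)
  rw [hinit] at hmain
  unfold rep_len
  rw [show PySem.List.pyRange 0 100 1 = 0 :: PySem.List.pyRange 1 100 1 from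
    PySem.List.pyRange_one_cons (by norm_num)]
  unfold repLenOuter
  cases hinner : repLenInner n 0 (PySem.List.pyRange 1 n 1) with
  | some t => rw [hmain, hinner]
  | none =>
      rw [hmain, hinner]
      have H : ∀ t, 1 ≤ t → t < n → (10:Int) ^ t.toNat % n ≠ 1 := by
        intro t ht1 ht2 hord
        have := (repLenInner_none_iff n 0 (PySem.List.pyRange 1 n 1)).mp hinner t
          (PySem.List.mem_pyRange_one.mpr ⟨ht1, ht2⟩)
        apply this
        simp only [Int.toNat_zero, pow_zero, zero_add,
          PySem.Int.mod_eq_emod_of_pos (show (0:Int) < n by omega)]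
        omega
      exact outer_all_none n hn hcop H (PySem.List.pyRange 1 100 1)
        (fun s hs => by rw [PySem.List.mem_pyRange_one] at hs; omega)

-- ===== VERDICT (by name: the statement is the Claim_ definition above) =====
theorem longest_d_spec : Claim_equal_longest_d := by
  intro limit _
  unfold Spec_longest_d longest_d longest_d_alt
  congr 1
  apply PySem.List.foldl_congr_mem
  intro md n hmem
  rw [PySem.List.mem_pyRange_one] at hmem
  by_cases hfilt : PySem.Int.mod n 2 ≠ 0 ∧ PySem.Int.mod n 3 ≠ 0 ∧ PySem.Int.mod n 5 ≠ 0
  · rw [if_pos hfilt, if_pos hfilt, rep_len_eq_order n hmem.1 hfilt.1 hfilt.2.2]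
  · rw [if_neg hfilt, if_neg hfilt]
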